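-- pv_equiv track=rewrite | github.com/mikecwikielnik/Python | Inversions.py | maxInversions
-- ===== SOURCE A (Python) =====
-- def maxInversions(arr):
--     n = len(arr)
--     icount = 0
--     for i in range(0,n-1):
--         for j in range(i+1, n):
--             if arr[i] > arr[j]:
--                 for k in range(j+1, n):
--                     if arr[j] > arr[k]:
--                         icount += 1
--     return icount
-- ===== SOURCE B (Python) =====
-- def maxInversions(arr):
--     # Per middle element j: (# of larger elements to the left) * (# of smaller elements to the right).
--     n = len(arr)
--     total = 0
--     for j in range(n):
--         v = arr[j]
--         left = 0
--         for i in range(j):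
--             if arr[i] > v:
--                 left += 1
--         right = 0
--         for k in range(j + 1, n):
--             if v > arr[k]:
--                 right += 1
--         total += left * right
--     return total
-- ===== Notes on version B (the rewrite author's own statement) =====
-- stated objective: faster
-- what changed: Instead of enumerating every triple (i,j,k) with three nested loops, B iterates once over the middle index j and multiplies the count of larger elements to its left by the count of smaller elements to its right.
import Mathlib
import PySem

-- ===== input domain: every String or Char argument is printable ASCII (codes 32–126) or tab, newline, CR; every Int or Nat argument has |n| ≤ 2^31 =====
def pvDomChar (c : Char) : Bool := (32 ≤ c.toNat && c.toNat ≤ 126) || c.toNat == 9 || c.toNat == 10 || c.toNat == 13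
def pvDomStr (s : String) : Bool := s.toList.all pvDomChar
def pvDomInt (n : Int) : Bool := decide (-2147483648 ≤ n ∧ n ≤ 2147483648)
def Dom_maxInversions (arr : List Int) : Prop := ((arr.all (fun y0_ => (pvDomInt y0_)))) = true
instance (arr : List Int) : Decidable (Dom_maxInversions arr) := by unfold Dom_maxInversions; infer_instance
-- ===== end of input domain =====

-- B replaces A's triple loop over (i,j,k) by a single loop over the middle index j,
-- adding (# larger elements left of j) * (# smaller elements right of j); O(n^2) vs O(n^3).

-- ===== PORT A =====
def maxInversions (arr : List Int) : Int :=
  let n : Int := (arr.length : Int)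
  (PySem.List.pyRange 0 (n - 1)).foldl (fun icount i =>
    (PySem.List.pyRange (i + 1) n).foldl (fun icount j =>
      if PySem.List.pyGetD arr i 0 > PySem.List.pyGetD arr j 0 then
        (PySem.List.pyRange (j + 1) n).foldl (fun icount k =>
          if PySem.List.pyGetD arr j 0 > PySem.List.pyGetD arr k 0 then icount + 1
          else icount) icount
      else icount) icount) 0

-- ===== PORT B =====
def maxInversions_alt (arr : List Int) : Int :=
  let n : Int := (arr.length : Int)
  (PySem.List.pyRange 0 n).foldl (fun total j =>
    let v := PySem.List.pyGetD arr j 0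
    let left := (PySem.List.pyRange 0 j).foldl (fun c i =>
      if PySem.List.pyGetD arr i 0 > v then c + 1 else c) 0
    let right := (PySem.List.pyRange (j + 1) n).foldl (fun c k =>
      if v > PySem.List.pyGetD arr k 0 then c + 1 else c) 0
    total + left * right) 0

-- ===== PRECONDITION & SPEC =====
def Spec_maxInversions (arr : List Int) (out : Int) : Prop := out = maxInversions_alt arr
instance (arr : List Int) (out : Int) : Decidable (Spec_maxInversions arr out) := by unfold Spec_maxInversions; infer_instance

-- ===== CLAIM (what is proved, stated in full; the proofs are below) =====
def Claim_equal_maxInversions : Prop := ∀ (arr : List Int), Dom_maxInversions arr → Spec_maxInversions arr (maxInversions arr)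

-- ===== LEMMAS AND PROOFS =====

-- glue: the counting/guarded fold bodies in additive form (Prop-ite version used by both ports)
theorem pvIteAddExtract (c : Prop) [Decidable c] (x y : Int) :
    (if c then x + y else x) = x + (if c then y else 0) := by
  split <;> ring

-- a guarded constant summand factors out of the sum
theorem pvSumIteMul (p : Int → Prop) [DecidablePred p] (l : List Int) (r : Int) :
    (l.map (fun i => if p i then r else 0)).sum
      = (l.map (fun i => if p i then (1 : Int) else 0)).sum * r := by
  rw [← List.sum_map_mul_right]
  apply congrArg
  apply List.map_congr_left
  intro i _
  split <;> ring

-- dropping the vacuous last outer index: range(0, n-1) vs range(0, n)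
theorem pvExtendSum (g : Int → Int) (m : Nat) (h0 : g ((m : Int) - 1) = 0) :
    ((PySem.List.pyRange 0 ((m : Int) - 1)).map g).sum
      = ((PySem.List.pyRange 0 (m : Int)).map g).sum := by
  cases m with
  | zero => simp [PySem.List.pyRange_one_eq_nil]
  | succ k =>
    have hc : ((k + 1 : Nat) : Int) - 1 = (k : Int) := by push_cast; ring
    rw [hc] at h0 ⊢
    have hs : ((k + 1 : Nat) : Int) = (k : Int) + 1 := by push_cast; ring
    rw [hs, PySem.List.pyRange_one_succ_right (by positivity)]
    simp [h0]

-- triangle sum swap: ∑_{i<n} ∑_{i<j<n} f i j = ∑_{j<n} ∑_{i<j} f i j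
theorem pvTriangle (f : Int → Int → Int) (m : Nat) :
    ((PySem.List.pyRange 0 (m : Int)).map
        (fun i => ((PySem.List.pyRange (i + 1) (m : Int)).map (fun j => f i j)).sum)).sum
      = ((PySem.List.pyRange 0 (m : Int)).map
        (fun j => ((PySem.List.pyRange 0 j).map (fun i => f i j)).sum)).sum := by
  induction m with
  | zero => simp [PySem.List.pyRange_one_eq_nil]
  | succ k ih =>
    have hs : ((k + 1 : Nat) : Int) = (k : Int) + 1 := by push_cast; ring
    rw [hs, PySem.List.pyRange_one_succ_right (by positivity)]
    simp only [List.map_append, List.sum_append, List.map_cons, List.map_nil,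
      List.sum_cons, List.sum_nil]
    have h1 : ((PySem.List.pyRange 0 (k : Int)).map
          (fun i => ((PySem.List.pyRange (i + 1) ((k : Int) + 1)).map (fun j => f i j)).sum))
        = ((PySem.List.pyRange 0 (k : Int)).map
          (fun i => ((PySem.List.pyRange (i + 1) (k : Int)).map (fun j => f i j)).sum
            + f i (k : Int))) := by
      apply List.map_congr_left
      intro i hi
      have hib := PySem.List.mem_pyRange_one.mp hi
      rw [PySem.List.pyRange_one_succ_right (by omega)]
      simp
    rw [h1, PySem.List.sum_map_add_int]
    rw [PySem.List.pyRange_one_eq_nil (le_refl ((k : Int) + 1))]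
    simp only [List.map_nil, List.sum_nil]
    rw [ih]
    ring

-- ===== VERDICT (by name: the statement is the Claim_ definition above) =====
theorem maxInversions_spec : Claim_equal_maxInversions := by
  intro arr _
  unfold Spec_maxInversions maxInversions maxInversions_alt
  simp only [pvIteAddExtract, PySem.List.foldl_add, zero_add]
  rw [pvExtendSum _ arr.length (by
    simp [sub_add_cancel, PySem.List.pyRange_one_eq_nil (le_refl (arr.length : Int))])]
  rw [pvTriangle (fun i j => if PySem.List.pyGetD arr i 0 > PySem.List.pyGetD arr j 0 then
      ((PySem.List.pyRange (j + 1) (arr.length : Int)).map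
        (fun k => if PySem.List.pyGetD arr j 0 > PySem.List.pyGetD arr k 0 then (1 : Int) else 0)).sum
    else 0) arr.length]
  apply congrArg
  apply List.map_congr_left
  intro j _
  exact pvSumIteMul _ _ _
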